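-- pv_equiv track=rewrite | github.com/leon2401119/thesis_take1 | RL.py | __myencoder
-- ===== SOURCE A (Python) =====
-- def __myencoder(flag_id):
--     code = ''
--     for _ in range(2):
--         modulo = flag_id % 36
--         if modulo <= 9:
--             char = chr(ord('0') + modulo)
--         else:
--             char = chr(ord('a') + modulo - 10)
--         code = char + code
--         flag_id //= 36
--     return code
-- ===== SOURCE B (Python) =====
-- DIGITS = '0123456789abcdefghijklmnopqrstuvwxyz'
-- CODES = [a + b for a in DIGITS for b in DIGITS]
--
-- def __myencoder(flag_id):
--     return CODES[flag_id % 1296]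
-- ===== Notes on version B (the rewrite author's own statement) =====
-- stated objective: alternative
-- what changed: Replaces per-digit divide-and-branch character construction with a precomputed table of all two-char codes, indexed once by flag_id modulo the table size (correct because A's output depends only on that residue).
import Mathlib
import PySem

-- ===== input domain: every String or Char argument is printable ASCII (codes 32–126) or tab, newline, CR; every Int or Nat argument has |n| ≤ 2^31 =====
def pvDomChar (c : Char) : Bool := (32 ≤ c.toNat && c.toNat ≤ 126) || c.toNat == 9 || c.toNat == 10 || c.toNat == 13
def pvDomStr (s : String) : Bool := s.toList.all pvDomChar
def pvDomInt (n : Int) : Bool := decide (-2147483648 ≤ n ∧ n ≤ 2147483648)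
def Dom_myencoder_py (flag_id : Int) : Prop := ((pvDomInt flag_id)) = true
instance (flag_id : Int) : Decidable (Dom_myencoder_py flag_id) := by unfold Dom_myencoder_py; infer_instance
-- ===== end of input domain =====

-- B replaces A's per-digit divide-and-branch loop with a precomputed 1296-entry code table indexed by flag_id % 1296 (alternative; same cost).

-- ===== PORT A =====
-- code is kept as List Char (prepend 'char + code' = cons); String.ofList at the end.
def myencoder_py (flag_id : Int) : String :=
  let res := (PySem.List.pyRange 0 2 1).foldl
    (fun (st : List Char × Int) _ =>
      let modulo := PySem.Int.mod st.2 36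
      let char := if modulo ≤ 9 then Char.ofNat (48 + modulo).toNat
                  else Char.ofNat (97 + modulo - 10).toNat
      (char :: st.1, PySem.Int.floordiv st.2 36))
    ([], flag_id)
  String.ofList res.1

-- ===== PORT B =====
def pvDigits : List Char := "0123456789abcdefghijklmnopqrstuvwxyz".toList

-- CODES = [a + b for a in DIGITS for b in DIGITS]
def pvCodes : List String := pvDigits.flatMap (fun a => pvDigits.map (fun b => String.ofList [a, b]))

-- the index flag_id % 1296 is always in [0, 1296), so getD's default "" is never hit
def myencoder_py_alt (flag_id : Int) : String :=
  pvCodes.getD (PySem.Int.mod flag_id 1296).toNat ""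

-- ===== PRECONDITION & SPEC =====
def Spec_myencoder_py (flag_id : Int) (out : String) : Prop := out = myencoder_py_alt flag_id
instance (flag_id : Int) (out : String) : Decidable (Spec_myencoder_py flag_id out) := by unfold Spec_myencoder_py; infer_instance

-- ===== CLAIM (what is proved, stated in full; the proofs are below) =====
def Claim_equal_myencoder_py : Prop := ∀ (flag_id : Int), Dom_myencoder_py flag_id → Spec_myencoder_py flag_id (myencoder_py flag_id)

-- ===== LEMMAS AND PROOFS =====

-- A's branch-built digit character equals the table digit, for any m in [0,36).
theorem pv_digit_eq (m : Int) (h0 : 0 ≤ m) (h36 : m < 36) :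
    (if m ≤ 9 then Char.ofNat (48 + m).toNat else Char.ofNat (97 + m - 10).toNat)
      = pvDigits.getD m.toNat ' ' := by
  obtain ⟨n, rfl⟩ : ∃ n : Nat, m = (n : Int) := ⟨m.toNat, (Int.toNat_of_nonneg h0).symm⟩
  have hn : n < 36 := by exact_mod_cast h36
  have : (if (n : Int) ≤ 9 then Char.ofNat (48 + (n : Int)).toNat
          else Char.ofNat (97 + (n : Int) - 10).toNat)
        = (if n ≤ 9 then Char.ofNat (48 + n) else Char.ofNat (97 + n - 10)) := by
    by_cases h : n ≤ 9 <;> simp [h] <;>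
      first
      | rfl
      | (congr 1; omega)
  rw [this]
  simp only [Int.toNat_natCast]
  interval_cases n <;> decide

-- indexing a 'for a in xs for b in ys' flat table: entry ys.length*h+l is f xs[h] ys[l]
theorem pv_flatMap_getD {α β γ : Type} (xs : List α) (ys : List β) (f : α → β → γ)
    (h l : Nat) (hh : h < xs.length) (hl : l < ys.length) (d : γ) (da : α) (db : β) :
    (xs.flatMap (fun a => ys.map (f a))).getD (ys.length * h + l) d
      = f (xs.getD h da) (ys.getD l db) := by
  induction xs generalizing h with
  | nil => simp at hh
  | cons a xs ih =>
    rw [List.flatMap_cons]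
    cases h with
    | zero =>
      have hl' : (0:Nat) * ys.length + l = l := by ring_nf
      simp only [Nat.mul_zero, Nat.zero_add]
      rw [List.getD_eq_getElem _ _ (by simp; omega), List.getElem_append_left (by simp [hl]),
          List.getElem_map, List.getD_cons_zero, List.getD_eq_getElem _ _ hl]
    | succ h =>
      have hlen : (ys.map (f a)).length = ys.length := by simp
      have : ys.length * (h + 1) + l = (ys.map (f a)).length + (ys.length * h + l) := by
        rw [hlen]; ring
      rw [this, List.getD_append_right _ _ _ _ (by omega), Nat.add_sub_cancel_left,
          List.getD_cons_succ]
      exact ih h (by simpa using hh)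

-- the code table at index 36*h+l is the two digits h, l
theorem pv_codes_getD (h l : Nat) (hh : h < 36) (hl : l < 36) :
    pvCodes.getD (36 * h + l) "" = String.ofList [pvDigits.getD h ' ', pvDigits.getD l ' '] := by
  have hd : pvDigits.length = 36 := by decide
  have := pv_flatMap_getD pvDigits pvDigits (fun a b => String.ofList [a, b])
    h l (by omega) (by omega) "" ' ' ' '
  rw [hd] at this
  exact this

-- ===== VERDICT (by name: the statement is the Claim_ definition above) =====
theorem myencoder_py_spec : Claim_equal_myencoder_py := by
  intro flag_id _
  show myencoder_py flag_id = myencoder_py_alt flag_id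
  have hr : PySem.List.pyRange 0 2 1 = [0, 1] := by decide
  simp only [myencoder_py, myencoder_py_alt, hr, List.foldl]
  rw [pv_digit_eq _ (PySem.Int.mod_nonneg _ (by norm_num)) (PySem.Int.mod_lt _ (by norm_num)),
      pv_digit_eq _ (PySem.Int.mod_nonneg _ (by norm_num)) (PySem.Int.mod_lt _ (by norm_num))]
  rw [PySem.Int.mod_eq_emod_of_pos (by norm_num : (0:Int) < 36),
      PySem.Int.mod_eq_emod_of_pos (by norm_num : (0:Int) < 36),
      PySem.Int.mod_eq_emod_of_pos (by norm_num : (0:Int) < 1296),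
      PySem.Int.floordiv_eq_ediv_of_pos (by norm_num : (0:Int) < 36)]
  set h : Nat := ((flag_id / 36) % 36).toNat with hh
  set l : Nat := (flag_id % 36).toNat with hl
  have hhb : h < 36 := by
    have := Int.emod_lt_of_pos (flag_id / 36) (by norm_num : (0:Int) < 36)
    omega
  have hlb : l < 36 := by
    have := Int.emod_lt_of_pos flag_id (by norm_num : (0:Int) < 36)
    omega
  have hidx : (flag_id % 1296).toNat = 36 * h + l := by
    have h1 : flag_id % 36 = (flag_id % 1296) % 36 := by omega
    have h2 : (flag_id / 36) % 36 = (flag_id % 1296) / 36 := by omega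
    have h3 : 0 ≤ flag_id % 1296 := Int.emod_nonneg _ (by norm_num)
    omega
  rw [hidx, pv_codes_getD h l hhb hlb]
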